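-- pv_equiv track=rewrite | github.com/ElisabethJoan/GoogleFoobar | Level 4/Challenge 4.1 - Bringing a Gun to a Guard Fight.py | genVectorMap
-- ===== SOURCE A (Python) =====
-- def genVectorMap(size, coord, length):
--     vectorMap = [coord]
--     count = 0
--     l, r = -coord, length - coord
--     for i in range(size):
--         left = vectorMap[0]
--         right = vectorMap[count]
--         left += (l*2)
--         right += (r*2)
--         l, r = -r, -l
--         vectorMap = [left] + vectorMap + [right]
--         count += 2
--
--     return vectorMap
-- ===== SOURCE B (Python) =====
-- def genVectorMap(size, coord, length):
--     n = max(size, 0)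
--     left = [-coord - (j - 1) * length if j % 2 == 1 else coord - j * length
--             for j in range(n, 0, -1)]
--     right = [(j + 1) * length - coord if j % 2 == 1 else j * length + coord
--              for j in range(n + 1)]
--     return left + right
-- ===== Notes on version B (the rewrite author's own statement) =====
-- stated objective: faster
-- what changed: Replaces the iterative grow-both-ends loop with mutable reflection state (l, r) carried between steps by a direct closed-form computation of each mirror-image position from its distance to the centre, assembled with two comprehensions.
import Mathlib
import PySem

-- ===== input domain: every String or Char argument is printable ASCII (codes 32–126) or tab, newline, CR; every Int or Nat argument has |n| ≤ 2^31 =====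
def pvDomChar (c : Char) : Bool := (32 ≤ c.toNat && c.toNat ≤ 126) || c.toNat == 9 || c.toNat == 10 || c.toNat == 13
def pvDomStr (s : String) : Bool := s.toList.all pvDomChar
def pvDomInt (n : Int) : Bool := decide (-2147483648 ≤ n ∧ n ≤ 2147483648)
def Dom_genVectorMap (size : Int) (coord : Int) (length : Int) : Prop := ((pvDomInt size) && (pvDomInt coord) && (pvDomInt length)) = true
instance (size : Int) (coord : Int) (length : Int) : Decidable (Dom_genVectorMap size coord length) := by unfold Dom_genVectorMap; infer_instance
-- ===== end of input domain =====

-- B replaces A's grow-both-ends loop (mutable reflection state l, r carried between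
-- steps) by a direct closed-form computation of each element from its distance to the
-- centre (two comprehensions, O(n) vs A's quadratic list rebuilding); objective: faster.

-- ===== PORT A =====
-- 'for i in range(size)' runs size.toNat times (0 when size ≤ 0); vectorMap[0] and
-- vectorMap[count] are ported with pyGetD (the index is always in range, since
-- count = len(vectorMap) - 1 throughout, so Python never raises here)
def genVectorMapLoop : Nat → List Int → Int → Int → Int → List Int
  | 0, vm, _, _, _ => vm
  | n + 1, vm, count, l, r =>
    let left := PySem.List.pyGetD vm 0 0 + l * 2
    let right := PySem.List.pyGetD vm count 0 + r * 2
    genVectorMapLoop n ([left] ++ vm ++ [right]) (count + 2) (-r) (-l)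

def genVectorMap (size : Int) (coord : Int) (length : Int) : List Int :=
  genVectorMapLoop size.toNat [coord] 0 (-coord) (length - coord)

-- ===== PORT B =====
def genVectorMap_alt (size : Int) (coord : Int) (length : Int) : List Int :=
  ((PySem.List.pyRange (max size 0) 0 (-1)).map
    (fun j => if j % 2 = 1 then -coord - (j - 1) * length else coord - j * length)) ++
  ((PySem.List.pyRange 0 (max size 0 + 1) 1).map
    (fun j => if j % 2 = 1 then (j + 1) * length - coord else j * length + coord))

-- ===== PRECONDITION & SPEC =====
def Spec_genVectorMap (size : Int) (coord : Int) (length : Int) (out : List Int) : Prop := out = genVectorMap_alt size coord length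
instance (size : Int) (coord : Int) (length : Int) (out : List Int) : Decidable (Spec_genVectorMap size coord length out) := by unfold Spec_genVectorMap; infer_instance

-- ===== CLAIM (what is proved, stated in full; the proofs are below) =====
def Claim_equal_genVectorMap : Prop := ∀ (size : Int) (coord : Int) (length : Int), Dom_genVectorMap size coord length → Spec_genVectorMap size coord length (genVectorMap size coord length)

-- ===== LEMMAS AND PROOFS =====

-- closed forms for the j-th mirror image left/right of the centre (the bodies of B's
-- two comprehensions)
def pvFL (c L j : Int) : Int := if j % 2 = 1 then -c - (j - 1) * L else c - j * L
def pvFR (c L j : Int) : Int := if j % 2 = 1 then (j + 1) * L - c else j * L + c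

-- the list A's loop holds after k iterations
def pvLst (c L : Int) (k : Nat) : List Int :=
  ((List.range k).map (fun (j : Nat) => pvFL c L ((j : Int) + 1))).reverse ++
  (List.range (k + 1)).map (fun (j : Nat) => pvFR c L (j : Int))

theorem pvLst_head (c L : Int) (k : Nat) :
    PySem.List.pyGetD (pvLst c L k) 0 0 = pvFL c L k := by
  cases k with
  | zero => simp [pvLst, pvFL, pvFR]
  | succ k =>
    unfold pvLst
    rw [List.range_succ]
    simp only [List.map_append, List.map_cons, List.map_nil, List.reverse_append,
      List.reverse_cons, List.reverse_nil, List.nil_append, List.cons_append,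
      PySem.List.pyGetD_zero_cons, Nat.cast_add, Nat.cast_one]

theorem pvLst_last (c L : Int) (k : Nat) :
    PySem.List.pyGetD (pvLst c L k) (2 * (k : Int)) 0 = pvFR c L k := by
  have h2k : (2 * (k : Int)) = ((2 * k : Nat) : Int) := by push_cast; ring
  rw [h2k, PySem.List.pyGetD_natCast]
  unfold pvLst
  rw [List.getD_eq_getElem?_getD, List.getElem?_append_right (by simp; omega)]
  simp [List.range_succ, Nat.two_mul]

theorem pvLst_succ (c L : Int) (k : Nat) :
    [pvFL c L ((k : Int) + 1)] ++ pvLst c L k ++ [pvFR c L ((k : Int) + 1)]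
      = pvLst c L (k + 1) := by
  unfold pvLst
  rw [List.range_succ (n := k), List.range_succ (n := k + 1)]
  simp [List.append_assoc]
  rw [List.range_succ]
  simp

theorem pvFL_step (c L : Int) (k : Nat) :
    pvFL c L k + (if (k : Int) % 2 = 0 then -c else c - L) * 2 = pvFL c L ((k : Int) + 1) := by
  unfold pvFL
  rcases Int.emod_two_eq_zero_or_one (k : Int) with h | h <;>
    split_ifs <;> first | ring1 | (exfalso; omega)

theorem pvFR_step (c L : Int) (k : Nat) :
    pvFR c L k + (if (k : Int) % 2 = 0 then L - c else c) * 2 = pvFR c L ((k : Int) + 1) := by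
  unfold pvFR
  rcases Int.emod_two_eq_zero_or_one (k : Int) with h | h <;>
    split_ifs <;> first | ring1 | (exfalso; omega)

theorem pvL_next (c L : Int) (k : Nat) :
    -(if (k : Int) % 2 = 0 then L - c else c)
      = (if ((k + 1 : Nat) : Int) % 2 = 0 then -c else c - L) := by
  rcases Int.emod_two_eq_zero_or_one (k : Int) with h | h <;>
    split_ifs <;> first | ring1 | (exfalso; omega)

theorem pvR_next (c L : Int) (k : Nat) :
    -(if (k : Int) % 2 = 0 then -c else c - L)
      = (if ((k + 1 : Nat) : Int) % 2 = 0 then L - c else c) := by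
  rcases Int.emod_two_eq_zero_or_one (k : Int) with h | h <;>
    split_ifs <;> first | ring1 | (exfalso; omega)

theorem pvLoop_inv (c L : Int) : ∀ (n k : Nat),
    genVectorMapLoop n (pvLst c L k) (2 * (k : Int))
      (if (k : Int) % 2 = 0 then -c else c - L)
      (if (k : Int) % 2 = 0 then L - c else c)
    = pvLst c L (k + n) := by
  intro n
  induction n with
  | zero => intro k; simp [genVectorMapLoop]
  | succ n ih =>
    intro k
    rw [genVectorMapLoop]
    simp only [pvLst_head, pvLst_last, pvFL_step, pvFR_step]
    rw [pvL_next, pvR_next, pvLst_succ]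
    have h2 : 2 * (k : Int) + 2 = 2 * ((k + 1 : Nat) : Int) := by push_cast; ring
    rw [h2, ih (k + 1)]
    congr 1
    omega

theorem pvA_closed (size c L : Int) : genVectorMap size c L = pvLst c L size.toNat := by
  unfold genVectorMap
  have h0 : pvLst c L 0 = [c] := by simp [pvLst, pvFR]
  have h := pvLoop_inv c L size.toNat 0
  simp only [Nat.cast_zero, mul_zero, h0, zero_add] at h
  simpa using h

theorem pvB_closed (size c L : Int) : genVectorMap_alt size c L = pvLst c L size.toNat := by
  unfold genVectorMap_alt pvLst
  rw [PySem.List.pyRange_neg_one_eq_reverse, PySem.List.pyRange_one, PySem.List.pyRange_one]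
  simp only [List.map_reverse, List.map_map]
  congr 1
  · have h0 : (max size 0 + 1 - (0 + 1)).toNat = size.toNat := by omega
    rw [h0]
    apply congrArg
    apply List.map_congr_left
    intro a _
    simp only [Function.comp]
    have : (0 : Int) + 1 + (a : Int) = (a : Int) + 1 := by ring
    rw [this]
    rfl
  · have h1 : (max size 0 + 1 - 0).toNat = size.toNat + 1 := by omega
    rw [h1]
    apply List.map_congr_left
    intro a _
    simp only [Function.comp, zero_add]
    rfl

-- ===== VERDICT (by name: the statement is the Claim_ definition above) =====
theorem genVectorMap_spec : Claim_equal_genVectorMap := by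
  intro size coord length _
  unfold Spec_genVectorMap
  rw [pvA_closed, pvB_closed]
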